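-- pv_equiv track=rewrite | github.com/yaswisample/opensource | Visa_prep/Ram'sAbsenceStreak.py | max_consecutive_absent_days
-- ===== SOURCE A (Python) =====
-- def max_consecutive_absent_days(attendance):
--     max_count = 0
--     current_count = 0
--     for day in attendance:
--         if day == 0:
--             current_count += 1
--             max_count = max(max_count, current_count)
--         else:
--             current_count = 0
--     return max_count
-- ===== SOURCE B (Python) =====
-- def max_consecutive_absent_days(attendance):
--     best = 0
--     i = 0
--     n = len(attendance)
--     while i < n:
--         x = attendance[i]
--         j = i + 1
--         while j < n and attendance[j] == x:
--             j += 1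
--         if x == 0:
--             best = max(best, j - i)
--         i = j
--     return best
-- ===== Notes on version B (the rewrite author's own statement) =====
-- stated objective: alternative
-- what changed: B segments the list into maximal runs of equal values with a two-pointer scan and takes the max length among zero-runs, instead of A's running counter reset on non-zero days.
import Mathlib
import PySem

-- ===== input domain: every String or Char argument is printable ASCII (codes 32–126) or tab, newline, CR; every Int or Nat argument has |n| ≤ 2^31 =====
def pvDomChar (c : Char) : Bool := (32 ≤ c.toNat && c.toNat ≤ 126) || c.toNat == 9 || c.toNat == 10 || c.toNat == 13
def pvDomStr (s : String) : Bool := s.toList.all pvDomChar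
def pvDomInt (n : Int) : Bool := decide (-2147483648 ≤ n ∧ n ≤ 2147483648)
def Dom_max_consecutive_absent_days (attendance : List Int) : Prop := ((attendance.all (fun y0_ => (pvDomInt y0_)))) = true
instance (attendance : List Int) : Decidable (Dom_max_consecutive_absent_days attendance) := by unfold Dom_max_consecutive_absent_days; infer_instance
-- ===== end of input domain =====

-- B segments the list into maximal runs of equal values (two-pointer scan) and takes the
-- max length among zero-runs, instead of A's running counter reset on non-zero days.

-- ===== PORT A =====
-- the for-loop of A, carrying (max_count, current_count)
def pvLoopA (m c : Int) : List Int → Int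
  | [] => m
  | day :: rest =>
    if day == 0 then pvLoopA (max m (c + 1)) (c + 1) rest
    else pvLoopA m 0 rest

def max_consecutive_absent_days (attendance : List Int) : Int :=
  pvLoopA 0 0 attendance

-- ===== PORT B =====
-- B's inner while loop: count how many further elements equal x, return (count, remaining list)
def pvRun (x : Int) : List Int → Int × List Int
  | [] => (0, [])
  | y :: ys =>
    if y == x then
      let p := pvRun x ys
      (p.1 + 1, p.2)
    else (0, y :: ys)

-- B's outer while loop: advance over one maximal run at a time, keeping the best zero-run
-- length; the Nat fuel (initially the list length, enough for the whole scan) only makes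
-- the recursion structural, it never cuts the computation short
def pvOuter : Nat → Int → List Int → Int
  | _, best, [] => best
  | 0, best, _ :: _ => best
  | f + 1, best, x :: xs =>
    let p := pvRun x xs
    pvOuter f (if x == 0 then max best (p.1 + 1) else best) p.2

def max_consecutive_absent_days_alt (attendance : List Int) : Int :=
  pvOuter attendance.length 0 attendance

-- ===== PRECONDITION & SPEC =====
def Spec_max_consecutive_absent_days (attendance : List Int) (out : Int) : Prop := out = max_consecutive_absent_days_alt attendance
instance (attendance : List Int) (out : Int) : Decidable (Spec_max_consecutive_absent_days attendance out) := by unfold Spec_max_consecutive_absent_days; infer_instance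

-- ===== CLAIM (what is proved, stated in full; the proofs are below) =====
def Claim_equal_max_consecutive_absent_days : Prop := ∀ (attendance : List Int), Dom_max_consecutive_absent_days attendance → Spec_max_consecutive_absent_days attendance (max_consecutive_absent_days attendance)

-- ===== LEMMAS AND PROOFS =====

theorem pvRun_len_le (x : Int) (l : List Int) : (pvRun x l).2.length ≤ l.length := by
  induction l with
  | nil => simp [pvRun]
  | cons y ys ih =>
    by_cases h : (y == x) = true
    · simp only [pvRun, if_pos h]
      exact Nat.le_succ_of_le ih
    · simp [pvRun, h]

-- pvRun computed via takeWhile / dropWhile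
theorem pvRun_eq (x : Int) (l : List Int) :
    pvRun x l = (((l.takeWhile (· == x)).length : Int), l.dropWhile (· == x)) := by
  induction l with
  | nil => simp [pvRun]
  | cons y ys ih =>
    by_cases h : (y == x) = true
    · simp only [pvRun, if_pos h, ih]
      rw [List.takeWhile_cons_of_pos (p := (· == x)) h,
          List.dropWhile_cons_of_pos (p := (· == x)) h]
      simp only [Prod.mk.injEq, List.length_cons]
      exact ⟨by push_cast; ring, trivial⟩
    · simp [pvRun, List.takeWhile, List.dropWhile, h]

theorem pvRun_fst_nonneg (x : Int) (l : List Int) : 0 ≤ (pvRun x l).1 := by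
  rw [pvRun_eq]; exact Int.natCast_nonneg _

-- accumulator lemma for B's outer loop
theorem pvOuter_max : ∀ (f : Nat) (l : List Int) (b : Int), l.length ≤ f → 0 ≤ b →
    pvOuter f b l = max b (pvOuter f 0 l) := by
  intro f
  induction f with
  | zero =>
    intro l b hl hb
    cases l with
    | nil => simp only [pvOuter]; omega
    | cons x xs => simp at hl
  | succ f ih =>
    intro l b hl hb
    cases l with
    | nil => simp only [pvOuter]; omega
    | cons x xs =>
      have hr := pvRun_fst_nonneg x xs
      have hxs : xs.length ≤ f := by simp at hl; omega
      have hlen : (pvRun x xs).2.length ≤ f := le_trans (pvRun_len_le x xs) hxs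
      by_cases hx : (x == 0) = true
      · simp only [pvOuter, if_pos hx]
        rw [ih (pvRun x xs).2 (max b ((pvRun x xs).1 + 1)) hlen (by omega),
            ih (pvRun x xs).2 (max 0 ((pvRun x xs).1 + 1)) hlen (by omega)]
        omega
      · simp only [pvOuter, if_neg hx]
        exact ih (pvRun x xs).2 b hlen hb

-- accumulator lemma for A's loop
theorem pvLoopA_max : ∀ (l : List Int) (m c : Int), 0 ≤ m → 0 ≤ c →
    pvLoopA m c l = max m (pvLoopA 0 c l) := by
  intro l
  induction l with
  | nil => intro m c hm _; simp only [pvLoopA]; omega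
  | cons d rest ih =>
    intro m c hm hc
    by_cases hd : (d == 0) = true
    · simp only [pvLoopA, if_pos hd]
      rw [ih (max m (c + 1)) (c + 1) (by omega) (by omega),
          ih (max 0 (c + 1)) (c + 1) (by omega) (by omega)]
      omega
    · simp only [pvLoopA, if_neg hd]
      rw [ih m 0 hm le_rfl, ih 0 0 le_rfl le_rfl]

-- skipping a block of non-zero days leaves A's loop state unchanged (current = 0)
theorem pvLoopA_skip : ∀ (t r : List Int) (m : Int),
    (∀ y ∈ t, ¬ (y == (0:Int)) = true) → pvLoopA m 0 (t ++ r) = pvLoopA m 0 r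
  | [], _, _, _ => rfl
  | y :: ys, r, m, h => by
    simp only [List.cons_append, pvLoopA, if_neg (h y (List.mem_cons_self ..))]
    exact pvLoopA_skip ys r m (fun z hz => h z (List.mem_cons_of_mem _ hz))

-- a block of zeros adds its length to the current counter (A keeps current ≤ max)
theorem pvLoopA_zeros : ∀ (t r : List Int) (m c : Int),
    (∀ y ∈ t, (y == (0:Int)) = true) → 0 ≤ c → c ≤ m →
    pvLoopA m c (t ++ r) = pvLoopA (max m (c + t.length)) (c + t.length) r
  | [], r, m, c, _, _, hcm => by
    have h0 : c + ((([] : List Int)).length : Int) = c := by simp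
    rw [List.nil_append, h0, max_eq_left hcm]
  | y :: ys, r, m, c, h, hc, hcm => by
    simp only [List.cons_append, pvLoopA, if_pos (h y (List.mem_cons_self ..))]
    rw [pvLoopA_zeros ys r (max m (c + 1)) (c + 1)
        (fun z hz => h z (List.mem_cons_of_mem _ hz)) (by omega) (le_max_right _ _)]
    have h1 : (((y :: ys).length : Int)) = (ys.length : Int) + 1 := by
      push_cast [List.length_cons]; ring
    rw [h1]
    have hl : (0:Int) ≤ (ys.length : Int) := Int.natCast_nonneg _
    have h2 : max (max m (c + 1)) (c + 1 + (ys.length : Int))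
        = max m (c + ((ys.length : Int) + 1)) := by omega
    have h3 : c + 1 + (ys.length : Int) = c + ((ys.length : Int) + 1) := by ring
    rw [h2, h3]

-- a non-empty dropWhile starts with an element falsifying the predicate
theorem pvDropWhile_head_false (p : Int → Bool) :
    ∀ (l : List Int) (y : Int) (ys : List Int), l.dropWhile p = y :: ys → p y = false := by
  intro l
  induction l with
  | nil => intro y ys h; simp [List.dropWhile] at h
  | cons a t ih =>
    intro y ys h
    by_cases hp : p a = true
    · rw [List.dropWhile_cons_of_pos hp] at h
      exact ih y ys h
    · rw [List.dropWhile_cons_of_neg hp] at h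
      cases h
      simpa using hp

-- main equivalence, by induction on the fuel, following B's run segmentation
theorem pvMain : ∀ (f : Nat) (l : List Int), l.length ≤ f → pvLoopA 0 0 l = pvOuter f 0 l := by
  intro f
  induction f with
  | zero =>
    intro l hl
    cases l with
    | nil => simp [pvLoopA, pvOuter]
    | cons x xs => simp at hl
  | succ f ih =>
    intro l hl
    cases l with
    | nil => simp [pvLoopA, pvOuter]
    | cons x xs =>
      have hxs : xs.length ≤ f := by simp at hl; omega
      have hsplit : xs.takeWhile (· == x) ++ xs.dropWhile (· == x) = xs :=
        List.takeWhile_append_dropWhile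
      have hrlen : (xs.dropWhile (· == x)).length ≤ f :=
        le_trans (List.length_dropWhile_le _ _) hxs
      have ihrest := ih (xs.dropWhile (· == x)) hrlen
      have htake : ∀ y ∈ xs.takeWhile (· == x), (y == x) = true :=
        fun y hy => List.mem_takeWhile_imp (p := (· == x)) hy
      by_cases hx : (x == 0) = true
      · have hx0 : x = 0 := by simpa using hx
        subst hx0
        have hL : (0:Int) ≤ ((xs.takeWhile (· == (0:Int))).length : Int) := Int.natCast_nonneg _
        simp only [pvOuter, if_pos hx, pvRun_eq]
        rw [pvOuter_max f _ _ hrlen (by omega), ← ihrest]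
        simp only [pvLoopA, if_pos hx]
        conv_lhs => rw [← hsplit]
        rw [pvLoopA_zeros _ _ _ _ htake (by omega) (le_max_right _ _)]
        rcases hre : xs.dropWhile (· == (0:Int)) with _ | ⟨y, ys⟩
        · simp only [pvLoopA]; omega
        · have hy : ¬ (y == (0:Int)) = true := by
            rw [pvDropWhile_head_false (· == (0:Int)) xs y ys hre]; simp
          simp only [pvLoopA, if_neg hy]
          rw [pvLoopA_max ys (max (max 0 (0 + 1))
              (0 + 1 + ((xs.takeWhile (· == (0:Int))).length : Int))) 0 (by omega) le_rfl,
              pvLoopA_max ys 0 0 le_rfl le_rfl]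
          omega
      · have htake0 : ∀ y ∈ xs.takeWhile (· == x), ¬ (y == (0:Int)) = true := by
          intro y hy
          have hyx : y = x := by simpa using htake y hy
          subst hyx
          exact hx
        simp only [pvOuter, if_neg hx, pvRun_eq]
        rw [← ihrest]
        simp only [pvLoopA, if_neg hx]
        conv_lhs => rw [← hsplit]
        exact pvLoopA_skip _ _ _ htake0

-- ===== VERDICT (by name: the statement is the Claim_ definition above) =====
theorem max_consecutive_absent_days_spec : Claim_equal_max_consecutive_absent_days := by
  intro attendance _
  unfold Spec_max_consecutive_absent_days max_consecutive_absent_days max_consecutive_absent_days_alt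
  exact pvMain attendance.length attendance le_rfl
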